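-- pv_equiv track=rewrite | github.com/blevic/project-euler | solutions/p100.py | solution
-- ===== SOURCE A (Python) =====
-- def solution(min_value):
--     x = 1  # x = 2*blue_discs - 1    =>  2*blue_discs*(blue_discs - 1) == total_discs*(total_discs - 1)
--     y = 1  # y = 2*total_discs - 1   =>  x**2 - 2*y**2 = -1
--
--     while True:
--         x, y = 3*x + 4*y, 2*x + 3*y
--         total_discs, blue_discs = (x + 1)//2, (y + 1)//2
--
--         if total_discs > min_value:
--             return blue_discs
-- ===== SOURCE B (Python) =====
-- def _isqrt(n):
--     x = n
--     y = (x + n // x) // 2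
--     while y < x:
--         x = y
--         y = (x + n // x) // 2
--     return x
--
--
-- def solution(min_value):
--     prev, total = 1, 4
--     while total <= min_value:
--         prev, total = total, 6 * total - prev - 2
--     return (1 + _isqrt(1 + 2 * total * (total - 1))) // 2
-- ===== Notes on version B (the rewrite author's own statement) =====
-- stated objective: alternative
-- what changed: B drops the coupled 2D Pell state entirely: it iterates a single scalar second-order recurrence total' = 6*total - prev - 2 on the total-disc sequence only, and recovers the blue count once at the end algebraically, via a Newton integer square root of 1 + 2*total*(total-1), instead of A's per-step 2x2 linear map on (x,y) with decoding (x+1)//2, (y+1)//2 each iteration.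
import Mathlib
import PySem

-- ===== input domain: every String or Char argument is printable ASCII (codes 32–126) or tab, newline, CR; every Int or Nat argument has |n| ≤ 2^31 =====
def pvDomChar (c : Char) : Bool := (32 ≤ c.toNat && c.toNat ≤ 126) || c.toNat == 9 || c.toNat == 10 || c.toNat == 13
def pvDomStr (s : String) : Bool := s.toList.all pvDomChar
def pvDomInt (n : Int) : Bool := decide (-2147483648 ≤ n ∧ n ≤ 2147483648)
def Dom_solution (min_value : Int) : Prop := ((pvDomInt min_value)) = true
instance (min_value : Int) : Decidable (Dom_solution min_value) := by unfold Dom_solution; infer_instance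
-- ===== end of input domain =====

-- B iterates a single scalar second-order recurrence on the total-disc sequence and recovers the
-- blue count once at the end via a Newton integer square root; objective: alternative algorithm.

-- ===== PORT A =====
-- A's 'while True' loop: transform (x,y), decode total/blue discs, return blue once total > min_value.
-- The hypothesis arguments 1 ≤ x, 1 ≤ y only make the recursion total (termination); they add no branch.
def solutionLoopA (min_value x y : Int) (hx : 1 ≤ x) (hy : 1 ≤ y) : Int :=
  let x' := 3*x + 4*y
  let y' := 2*x + 3*y
  let total_discs := PySem.Int.floordiv (x' + 1) 2
  let blue_discs := PySem.Int.floordiv (y' + 1) 2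
  if total_discs > min_value then blue_discs
  else solutionLoopA min_value x' y' (by omega) (by omega)
termination_by (2*min_value + 1 - y).toNat
decreasing_by
  rename_i h
  simp only [total_discs, x', PySem.Int.floordiv_eq_ediv_of_pos (by norm_num : (0:Int) < 2)] at h
  omega

def solution (min_value : Int) : Int :=
  solutionLoopA min_value 1 1 (by norm_num) (by norm_num)

-- ===== PORT B =====
-- Termination/definedness facts the B port cites (they add no branch to the computation):
theorem newtonStep_ge_one (n y : Int) (hn : 1 ≤ n) (hy : 1 ≤ y) :
    1 ≤ PySem.Int.floordiv (y + PySem.Int.floordiv n y) 2 := by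
  rw [PySem.Int.floordiv_eq_ediv_of_pos (by omega), PySem.Int.floordiv_eq_ediv_of_pos (by omega)]
  have h1 : 0 ≤ n / y := Int.ediv_nonneg (by omega) (by omega)
  rcases eq_or_lt_of_le hy with h | h
  · have : n / y = n := by rw [← h]; simp
    omega
  · omega

theorem sq_pred_nonneg (t : Int) : 1 ≤ 1 + 2*t*(t-1) := by nlinarith [sq_nonneg (2*t - 1)]

-- B's Newton isqrt loop: x = current iterate, y = next iterate (already computed).
def isqrtLoopB (n x y : Int) (hn : 1 ≤ n) (hx : 1 ≤ x) (hy : 1 ≤ y) : Int :=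
  if y < x then
    isqrtLoopB n y (PySem.Int.floordiv (y + PySem.Int.floordiv n y) 2) hn hy
      (newtonStep_ge_one n y hn hy)
  else x
termination_by x.toNat
decreasing_by omega

-- Source B's _isqrt: x = n; y = (x + n//x)//2; then the loop.
def pyIsqrt (n : Int) (hn : 1 ≤ n) : Int :=
  isqrtLoopB n n (PySem.Int.floordiv (n + PySem.Int.floordiv n n) 2) hn hn
    (newtonStep_ge_one n n hn hn)

-- Source B's final line: recover blue from the final total.
def blueOfTotal (t : Int) : Int :=
  PySem.Int.floordiv (1 + pyIsqrt (1 + 2*t*(t-1)) (sq_pred_nonneg t)) 2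

-- Source B's 'while total <= min_value' loop on the scalar total sequence.
def totalLoopB (min_value prev total : Int) (hp : 1 ≤ prev) (ht : prev < total) : Int :=
  if total ≤ min_value then
    totalLoopB min_value total (6*total - prev - 2) (by omega) (by omega)
  else total
termination_by (min_value + 1 - total).toNat
decreasing_by omega

def solution_alt (min_value : Int) : Int :=
  blueOfTotal (totalLoopB min_value 1 4 (by norm_num) (by norm_num))

-- ===== PRECONDITION & SPEC =====
def Spec_solution (min_value : Int) (out : Int) : Prop := out = solution_alt min_value
instance (min_value : Int) (out : Int) : Decidable (Spec_solution min_value out) := by unfold Spec_solution; infer_instance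

-- ===== CLAIM (what is proved, stated in full; the proofs are below) =====
def Claim_equal_solution : Prop := ∀ (min_value : Int), Dom_solution min_value → Spec_solution min_value (solution min_value)

-- ===== LEMMAS AND PROOFS =====

-- AM-GM step for the Newton iteration, in integers: for x ≥ 1, (x + r²//x) ≥ 2r.
theorem newton_amgm (x r : Int) (hx : 1 ≤ x) (hr : 1 ≤ r) :
    2*r ≤ x + PySem.Int.floordiv (r*r) x := by
  rw [PySem.Int.floordiv_eq_ediv_of_pos (by omega)]
  set q := (r*r) / x with hq
  have hmod : x * q + (r*r) % x = r*r := Int.ediv_add_emod (r*r) x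
  have h0 : 0 ≤ (r*r) % x := Int.emod_nonneg _ (by omega)
  have h1 : (r*r) % x < x := Int.emod_lt_of_pos _ (by omega)
  nlinarith [sq_nonneg (x - r)]

-- Newton's loop computes the exact root on a perfect square: if n = r² and r ≤ x,
-- y = (x + n//x)//2, then the loop returns r.  Induction on a fuel bound for x.
theorem isqrtLoopB_sq (n r : Int) (hn : 1 ≤ n) (hr : 1 ≤ r) (hnr : n = r*r) :
    ∀ (fuel : Nat) (x y : Int) (hx : 1 ≤ x) (hy : 1 ≤ y), r ≤ x →
      y = PySem.Int.floordiv (x + PySem.Int.floordiv n x) 2 →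
      x.toNat ≤ fuel →
      isqrtLoopB n x y hn hx hy = r := by
  intro fuel
  induction fuel with
  | zero =>
    intro x y hx hy hrx hyv hf
    omega
  | succ fuel ih =>
    intro x y hx hy hrx hyv hf
    have hge : 2*r ≤ x + PySem.Int.floordiv n x := by
      rw [hnr]; exact newton_amgm x r hx hr
    have hyr : r ≤ y := by
      rw [hyv, PySem.Int.floordiv_eq_ediv_of_pos (by norm_num : (0:Int) < 2)]
      omega
    rw [isqrtLoopB]
    by_cases hlt : y < x
    · rw [if_pos hlt]
      exact ih y _ hy (newtonStep_ge_one n y hn hy) hyr rfl (by omega)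
    · rw [if_neg hlt]
      -- y ≥ x forces n//x ≥ x hence n ≥ x², so x ≤ r; with r ≤ x, x = r.
      push_neg at hlt
      have hdiv : x ≤ (n / x) := by
        rw [hyv, PySem.Int.floordiv_eq_ediv_of_pos (show (0:Int) < 2 by norm_num),
            PySem.Int.floordiv_eq_ediv_of_pos (show (0:Int) < x by omega)] at hlt
        generalize hd : n / x = d at hlt
        omega
      have hsq : x * x ≤ n := by
        have := Int.ediv_add_emod n x
        have h0 : 0 ≤ n % x := Int.emod_nonneg _ (by omega)
        nlinarith
      have : x ≤ r := by nlinarith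
      omega

-- At a Pell point (x², with x odd, x² - 2y² = -1), blueOfTotal of t = (x+1)/2 gives (y+1)/2.
theorem blueOfTotal_pell (x y : Int) (hx : 1 ≤ x) (hy : 1 ≤ y)
    (hox : x % 2 = 1) (hoy : y % 2 = 1) (hpell : x*x - 2*(y*y) = -1) :
    blueOfTotal (PySem.Int.floordiv (x + 1) 2) = PySem.Int.floordiv (y + 1) 2 := by
  set t := PySem.Int.floordiv (x + 1) 2 with htdef
  have ht : x = 2*t - 1 := by
    rw [htdef, PySem.Int.floordiv_eq_ediv_of_pos (by norm_num : (0:Int) < 2)]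
    omega
  have hsq : 1 + 2*t*(t-1) = y*y := by nlinarith
  unfold blueOfTotal pyIsqrt
  have := isqrtLoopB_sq (1 + 2*t*(t-1)) y (sq_pred_nonneg t) hy hsq
    (1 + 2*t*(t-1)).toNat (1 + 2*t*(t-1))
    (PySem.Int.floordiv ((1 + 2*t*(t-1)) + PySem.Int.floordiv (1 + 2*t*(t-1)) (1 + 2*t*(t-1))) 2)
    (sq_pred_nonneg t)
    (newtonStep_ge_one _ _ (sq_pred_nonneg t) (sq_pred_nonneg t))
    (by nlinarith) rfl (by omega)
  rw [this, add_comm]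

-- Loop correspondence: A's pre-transform state (x,y) matches B's (prev,total) via
-- prev = (x+1)/2, total = (3x+4y+1)/2, with x,y odd and the Pell invariant x²-2y² = -1.
theorem loopA_eq_loopB (min_value : Int) :
    ∀ (n : Nat) (x y : Int) (hx : 1 ≤ x) (hy : 1 ≤ y), x % 2 = 1 → y % 2 = 1 →
    x*x - 2*(y*y) = -1 →
    ∀ (prev total : Int) (hp : 1 ≤ prev) (ht : prev < total),
      prev = (x + 1) / 2 → total = (3*x + 4*y + 1) / 2 →
      (2*min_value + 1 - y).toNat ≤ n →
      solutionLoopA min_value x y hx hy =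
        blueOfTotal (totalLoopB min_value prev total hp ht) := by
  intro n
  induction n with
  | zero =>
    intro x y hx hy hox hoy hpell prev total hp ht hpv htv hm
    rw [solutionLoopA, totalLoopB]
    simp only [PySem.Int.floordiv_eq_ediv_of_pos (by norm_num : (0:Int) < 2)]
    rw [if_pos (by omega), if_neg (by omega)]
    have hb := blueOfTotal_pell (3*x + 4*y) (2*x + 3*y) (by omega) (by omega)
      (by omega) (by omega) (by ring_nf; ring_nf at hpell; linarith)
    rw [PySem.Int.floordiv_eq_ediv_of_pos (by norm_num : (0:Int) < 2),
        PySem.Int.floordiv_eq_ediv_of_pos (by norm_num : (0:Int) < 2)] at hb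
    rw [htv]
    exact hb.symm
  | succ n ih =>
    intro x y hx hy hox hoy hpell prev total hp ht hpv htv hm
    rw [solutionLoopA, totalLoopB]
    simp only [PySem.Int.floordiv_eq_ediv_of_pos (by norm_num : (0:Int) < 2)]
    by_cases hguard : (3*x + 4*y + 1) / 2 > min_value
    · rw [if_pos hguard, if_neg (by omega)]
      have hb := blueOfTotal_pell (3*x + 4*y) (2*x + 3*y) (by omega) (by omega)
        (by omega) (by omega) (by ring_nf; ring_nf at hpell; linarith)
      rw [PySem.Int.floordiv_eq_ediv_of_pos (by norm_num : (0:Int) < 2),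
          PySem.Int.floordiv_eq_ediv_of_pos (by norm_num : (0:Int) < 2)] at hb
      rw [htv]
      exact hb.symm
    · rw [if_neg hguard, if_pos (by omega)]
      exact ih (3*x + 4*y) (2*x + 3*y) (by omega) (by omega) (by omega) (by omega)
        (by ring_nf; ring_nf at hpell; linarith)
        total (6*total - prev - 2) (by omega) (by omega)
        (by omega) (by omega) (by omega)

theorem solution_eq (min_value : Int) : solution min_value = solution_alt min_value := by
  unfold solution solution_alt
  exact loopA_eq_loopB min_value (2*min_value + 1 - 1).toNat 1 1 (by norm_num) (by norm_num)
    (by decide) (by decide) (by decide) 1 4 (by norm_num) (by norm_num)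
    (by decide) (by decide) (by omega)

-- ===== VERDICT (by name: the statement is the Claim_ definition above) =====
theorem solution_spec : Claim_equal_solution := by
  intro min_value _
  unfold Spec_solution
  exact solution_eq min_value
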